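-- pv_equiv track=rewrite | github.com/MSD21091969/moos | _legacy/ffs2_mvp/ColliderDataServer/src/api/nodes.py | _get_ancestry
-- ===== SOURCE A (Python) =====
-- def _get_ancestry(path: str) -> list[str]:
--     """Get list of ancestor paths from root to the given path."""
--     if path == "/":
--         return ["/"]
--
--     ancestry = ["/"]
--     parts = path.strip("/").split("/")
--     current = ""
--     for part in parts:
--         current = f"{current}/{part}"
--         ancestry.append(current)
--
--     return ancestry
-- ===== SOURCE B (Python) =====
-- def _get_ancestry(path: str) -> list[str]:
--     """Get list of ancestor paths from root to the given path."""
--     if path == "/":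
--         return ["/"]
--     parts = path.strip("/").split("/")
--     return ["/"] + ["/" + "/".join(parts[: i + 1]) for i in range(len(parts))]
-- ===== Notes on version B (the rewrite author's own statement) =====
-- stated objective: alternative
-- what changed: Replaces A's running-accumulator loop that mutates `current` with a closed-form comprehension that builds each ancestor as '/' + '/'.join(parts[:i+1]) directly from the prefix of parts.
import Mathlib
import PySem

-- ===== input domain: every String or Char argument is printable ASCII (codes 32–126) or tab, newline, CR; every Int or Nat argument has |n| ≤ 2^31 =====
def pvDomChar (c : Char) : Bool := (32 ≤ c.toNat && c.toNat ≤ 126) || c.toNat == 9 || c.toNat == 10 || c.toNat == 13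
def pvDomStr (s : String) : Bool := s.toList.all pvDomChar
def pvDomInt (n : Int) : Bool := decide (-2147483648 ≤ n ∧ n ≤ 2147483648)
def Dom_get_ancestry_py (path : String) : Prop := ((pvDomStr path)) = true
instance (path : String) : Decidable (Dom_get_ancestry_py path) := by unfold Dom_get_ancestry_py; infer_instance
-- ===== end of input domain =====

-- B replaces A's running-accumulator loop by a closed-form comprehension over prefix joins
-- ("/" + "/".join(parts[:i+1])); same values, alternative decomposition (no speed claim).

-- ===== PORT A =====
-- A: running accumulator `current`, appending `current + "/" + part` at each step.
def get_ancestry_py (path : String) : List String :=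
  if path == "/" then ["/"]
  else
    let parts := PySem.Chars.splitOn (PySem.Chars.stripChars path.toList ['/']) ['/']
    let res := parts.foldl
      (fun (st : List (List Char) × List Char) part =>
        (st.1 ++ [st.2 ++ '/' :: part], st.2 ++ '/' :: part)) ([['/']], [])
    res.1.map String.ofList

-- ===== PORT B =====
-- B: "/" followed by, for each i, the join of the first i+1 parts prefixed by "/".
def get_ancestry_py_alt (path : String) : List String :=
  if path == "/" then ["/"]
  else
    let parts := PySem.Chars.splitOn (PySem.Chars.stripChars path.toList ['/']) ['/']
    "/" :: (List.range parts.length).map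
      (fun i => String.ofList ('/' :: PySem.Chars.join ['/'] (parts.take (i + 1))))

-- ===== PRECONDITION & SPEC =====
def Spec_get_ancestry_py (path : String) (out : List String) : Prop := out = get_ancestry_py_alt path
instance (path : String) (out : List String) : Decidable (Spec_get_ancestry_py path out) := by unfold Spec_get_ancestry_py; infer_instance

-- ===== CLAIM (what is proved, stated in full; the proofs are below) =====
def Claim_equal_get_ancestry_py : Prop := ∀ (path : String), Dom_get_ancestry_py path → Spec_get_ancestry_py path (get_ancestry_py path)

-- ===== LEMMAS AND PROOFS =====

-- A's loop, with general accumulators, produces the prefix joins in closed form.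
theorem pv_fold_anc (parts : List (List Char)) (acc : List (List Char)) (cur : List Char) :
    (parts.foldl
      (fun (st : List (List Char) × List Char) part =>
        (st.1 ++ [st.2 ++ '/' :: part], st.2 ++ '/' :: part)) (acc, cur)).1
    = acc ++ (List.range parts.length).map
        (fun i => cur ++ '/' :: PySem.Chars.join ['/'] (parts.take (i + 1))) := by
  induction parts generalizing acc cur with
  | nil => simp
  | cons p rest ih =>
    simp only [List.foldl_cons]
    rw [ih, List.length_cons, List.range_succ_eq_map]
    simp only [List.map_cons, List.map_map, List.append_assoc, List.singleton_append]
    congr 1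
    simp only [PySem.Chars.join_singleton, List.take_succ_cons, List.take_zero, List.cons.injEq,
      true_and]
    apply List.map_congr_left
    intro i hi
    have hi' : i < rest.length := List.mem_range.mp hi
    simp only [Function.comp_apply]
    obtain ⟨q, l, hq⟩ : ∃ q l, rest.take (i + 1) = q :: l := by
      cases h : rest.take (i + 1) with
      | nil =>
        exfalso
        rcases List.take_eq_nil_iff.mp h with h' | h'
        · omega
        · simp [h'] at hi'
      | cons q l => exact ⟨q, l, rfl⟩
    rw [hq, PySem.Chars.join_cons_cons]
    simp

-- ===== VERDICT (by name: the statement is the Claim_ definition above) =====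
theorem get_ancestry_py_spec : Claim_equal_get_ancestry_py := by
  intro path _
  unfold Spec_get_ancestry_py get_ancestry_py get_ancestry_py_alt
  by_cases h : path == "/"
  · simp [h]
  · simp only [h, Bool.false_eq_true, if_false]
    rw [pv_fold_anc]
    simp only [List.map_map, List.map_cons, List.singleton_append, List.nil_append]
    rfl
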